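-- pv_equiv track=rewrite | github.com/jansowa/translate-context-relevance-datasets | translate_context_relevance_dataset.py | spans_to_pieces
-- ===== SOURCE A (Python) =====
-- from typing import Any, Dict, List, Optional, Tuple
--
-- def spans_to_pieces(text: str, spans: List[List[int]]) -> Tuple[List[str], List[str]]:
--     if not spans:
--         return [text], []
--
--     gaps: List[str] = []
--     span_texts: List[str] = []
--     prev_end = 0
--
--     for (s, e) in spans:
--         s = int(s)
--         e = int(e)
--         if s < prev_end:
--             raise ValueError(f"Spans overlap: prev_end={prev_end}, start={s}")
--         if s > len(text) or e > len(text) or s < 0 or e < 0 or e < s: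
--             raise ValueError(f"Invalid span [{s},{e}) for text length {len(text)}")
--         gaps.append(text[prev_end:s])
--         span_texts.append(text[s:e])
--         prev_end = e
--
--     gaps.append(text[prev_end:])
--     return gaps, span_texts
-- ===== SOURCE B (Python) =====
-- from typing import List, Tuple
--
--
-- def spans_to_pieces(text: str, spans: List[List[int]]) -> Tuple[List[str], List[str]]:
--     if not spans:
--         return [text], []
--
--     n = len(text)
--     bounds: List[int] = [0]
--     prev_end = 0
--     for s, e in spans:
--         s = int(s)
--         e = int(e)
--         if s < prev_end:
--             raise ValueError(f"Spans overlap: prev_end={prev_end}, start={s}")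
--         if s > n or e > n or s < 0 or e < 0 or e < s:
--             raise ValueError(f"Invalid span [{s},{e}) for text length {n}")
--         bounds.append(s)
--         bounds.append(e)
--         prev_end = e
--     bounds.append(n)
--
--     pieces = [text[a:b] for a, b in zip(bounds, bounds[1:])]
--     return pieces[::2], pieces[1::2]
-- ===== Notes on version B (the rewrite author's own statement) =====
-- stated objective: alternative
-- what changed: B is a staged pipeline: it first validates the spans while collecting a flat boundary list [0, s0, e0, ..., len(text)], then slices the text once at each pair of consecutive boundaries, and finally splits the flat piece list by parity (pieces[::2] are the gaps, pieces[1::2] the span texts), instead of A's single loop that interleaves slicing into two accumulators; Pre_ excludes exactly the inputs on which A raises ValueError (non-pair spans, overlapping or out-of-range spans).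
import Mathlib
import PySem

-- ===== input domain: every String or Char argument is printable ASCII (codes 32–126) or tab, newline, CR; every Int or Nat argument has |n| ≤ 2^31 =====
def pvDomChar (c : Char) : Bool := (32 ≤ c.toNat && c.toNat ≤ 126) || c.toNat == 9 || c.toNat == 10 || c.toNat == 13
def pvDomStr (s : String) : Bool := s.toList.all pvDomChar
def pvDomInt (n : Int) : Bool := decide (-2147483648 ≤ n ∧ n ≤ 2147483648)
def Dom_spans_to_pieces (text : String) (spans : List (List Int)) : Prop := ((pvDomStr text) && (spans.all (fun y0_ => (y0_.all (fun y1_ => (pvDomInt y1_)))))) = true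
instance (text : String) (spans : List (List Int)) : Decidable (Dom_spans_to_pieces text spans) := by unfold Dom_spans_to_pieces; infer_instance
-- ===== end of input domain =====

-- B builds a flat boundary list, slices once at consecutive boundaries and splits the pieces
-- by parity, instead of A's single loop interleaving slices into two accumulators (alternative).

-- ===== PORT A =====
-- the for-loop over spans with its three accumulators (gaps, span_texts, prev_end);
-- on any `raise ValueError` path (outside Pre_) it returns ([], [])
def spansToPiecesLoop (text : String) : List (List Int) → List String → List String → Int → List String × List String
  | [], gaps, spanTexts, prevEnd =>
      (gaps ++ [PySem.Str.slice text (some prevEnd) none], spanTexts)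
  | sp :: rest, gaps, spanTexts, prevEnd =>
      match sp with
      | [s, e] =>
          if s < prevEnd then ([], [])
          else if s > (PySem.Str.len text) || e > (PySem.Str.len text) || s < 0 || e < 0 || e < s then ([], [])
          else spansToPiecesLoop text rest
                 (gaps ++ [PySem.Str.slice text (some prevEnd) (some s)])
                 (spanTexts ++ [PySem.Str.slice text (some s) (some e)]) e
      | _ => ([], [])  -- `for (s, e) in spans` unpacking fails (outside Pre_)

def spans_to_pieces (text : String) (spans : List (List Int)) : List String × List String :=
  if spans = [] then ([text], [])
  else spansToPiecesLoop text spans [] [] 0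

-- ===== PORT B =====
-- the validating loop building the inner boundary list [s0, e0, s1, e1, …];
-- none = a `raise ValueError` / unpacking-failure path (outside Pre_)
def altBounds (n : Int) : List (List Int) → Int → Option (List Int)
  | [], _ => some []
  | sp :: rest, prevEnd =>
      match sp with
      | [s, e] =>
          if s < prevEnd then none
          else if s > n || e > n || s < 0 || e < 0 || e < s then none
          else (altBounds n rest e).map (fun bs => s :: e :: bs)
      | _ => none

-- pieces[::2] ported by hand (extended slice with step 2, nonneg default bounds):
-- exact — it keeps every other element starting with the first
def everyOther {α : Type} : List α → List α
  | [] => []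
  | [x] => [x]
  | x :: _ :: rest => x :: everyOther rest

def spans_to_pieces_alt (text : String) (spans : List (List Int)) : List String × List String :=
  if spans = [] then ([text], [])
  else
    let n := PySem.Str.len text
    match altBounds n spans 0 with
    | none => ([], [])
    | some bs =>
        let bounds : List Int := 0 :: bs ++ [n]
        let pieces := (bounds.zip bounds.tail).map
          (fun p => PySem.Str.slice text (some p.1) (some p.2))
        (everyOther pieces, everyOther pieces.tail)

-- ===== PRECONDITION & SPEC =====
-- Pre_ excludes exactly the inputs on which A raises ValueError: a span that is not a pair,
-- or boundaries that fail the chain 0 ≤ s0 ≤ e0 ≤ s1 ≤ … ≤ e_last ≤ len(text).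
def Pre_spans_to_pieces (text : String) (spans : List (List Int)) : Prop :=
  (∀ sp ∈ spans, sp.length = 2) ∧
  List.Pairwise (· ≤ ·) ((0 : Int) :: (spans.flatMap id ++ [(text.length : Int)]))
instance (text : String) (spans : List (List Int)) : Decidable (Pre_spans_to_pieces text spans) := by
  unfold Pre_spans_to_pieces; infer_instance

def pvWitness_spans_to_pieces : String × List (List Int) := ("hello", [[1, 3], [4, 5]])

def Spec_spans_to_pieces (text : String) (spans : List (List Int)) (out : List String × List String) : Prop := out = spans_to_pieces_alt text spans
instance (text : String) (spans : List (List Int)) (out : List String × List String) : Decidable (Spec_spans_to_pieces text spans out) := by unfold Spec_spans_to_pieces; infer_instance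

-- ===== CLAIM (what is proved, stated in full; the proofs are below) =====
def Claim_equal_spans_to_pieces : Prop := ∀ (text : String) (spans : List (List Int)), Dom_spans_to_pieces text spans → Pre_spans_to_pieces text spans → Spec_spans_to_pieces text spans (spans_to_pieces text spans)

-- ===== LEMMAS AND PROOFS =====

-- the text pieces at consecutive boundaries (proof-only helper characterising B's zip+map)
def piecesOf (text : String) : List Int → List String
  | a :: b :: rest => PySem.Str.slice text (some a) (some b) :: piecesOf text (b :: rest)
  | _ => []

theorem zip_map_eq_piecesOf (text : String) : ∀ (l : List Int),
    ((l.zip l.tail).map (fun p => PySem.Str.slice text (some p.1) (some p.2))) = piecesOf text l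
  | [] => rfl
  | [_] => rfl
  | a :: b :: rest => by
      simpa [piecesOf] using zip_map_eq_piecesOf text (b :: rest)

theorem everyOther_cons {α : Type} (x : α) (l : List α) :
    everyOther (x :: l) = x :: everyOther l.tail := by
  cases l <;> rfl

theorem strLen_eq (text : String) : PySem.Str.len text = (text.length : Int) := by
  simp [PySem.Str.len]

theorem slice_from_eq_slice_len (text : String) (a : Int) (h0 : 0 ≤ a) :
    PySem.Str.slice text (some a) none = PySem.Str.slice text (some a) (some (text.length : Int)) := by
  apply String.toList_inj.mp
  rw [PySem.Str.toList_slice, PySem.Str.toList_slice, PySem.Chars.slice_eq_listSlice,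
    PySem.Chars.slice_eq_listSlice, PySem.List.slice_from _ h0,
    PySem.List.slice_toNat _ h0 (Int.natCast_nonneg _)]
  exact (List.take_of_length_le (by simp)).symm

theorem loop_eq (text : String) : ∀ (spans : List (List Int)) (prevEnd : Int)
    (gaps sts : List String), 0 ≤ prevEnd →
    (∀ sp ∈ spans, sp.length = 2) →
    List.Pairwise (· ≤ ·) (prevEnd :: (spans.flatMap id ++ [(text.length : Int)])) →
    ∃ bs, altBounds (PySem.Str.len text) spans prevEnd = some bs ∧
      spansToPiecesLoop text spans gaps sts prevEnd =
        (gaps ++ everyOther (piecesOf text (prevEnd :: bs ++ [(text.length : Int)])),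
         sts ++ everyOther (piecesOf text (prevEnd :: bs ++ [(text.length : Int)])).tail)
  | [], prevEnd, gaps, sts, h0, _, hpw => by
      refine ⟨[], rfl, ?_⟩
      simp [spansToPiecesLoop, piecesOf, everyOther,
        slice_from_eq_slice_len text prevEnd h0]
  | sp :: rest, prevEnd, gaps, sts, h0, hlen, hpw => by
      obtain ⟨s, e, rfl⟩ : ∃ s e, sp = [s, e] := by
        have h2 := hlen sp (by simp)
        match sp, h2 with
        | [s, e], _ => exact ⟨s, e, rfl⟩
      have hflat : ([s, e] :: rest).flatMap id = s :: e :: rest.flatMap id := by simp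
      rw [hflat] at hpw
      have hps : prevEnd ≤ s := (List.pairwise_cons.mp hpw).1 s (by simp)
      have hpw2 : List.Pairwise (· ≤ ·) (s :: e :: (rest.flatMap id ++ [(text.length : Int)])) :=
        (List.pairwise_cons.mp hpw).2
      have hse : s ≤ e := (List.pairwise_cons.mp hpw2).1 e (by simp)
      have hsn : s ≤ (text.length : Int) := (List.pairwise_cons.mp hpw2).1 _ (by simp)
      have hen : e ≤ (text.length : Int) :=
        (List.pairwise_cons.mp (List.pairwise_cons.mp hpw2).2).1 _ (by simp)
      have hpwe : List.Pairwise (· ≤ ·) (e :: (rest.flatMap id ++ [(text.length : Int)])) :=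
        (List.pairwise_cons.mp hpw2).2
      obtain ⟨bs, hb, hloop⟩ := loop_eq text rest e
        (gaps ++ [PySem.Str.slice text (some prevEnd) (some s)])
        (sts ++ [PySem.Str.slice text (some s) (some e)])
        (le_trans h0 (le_trans hps hse)) (fun x hx => hlen x (by simp [hx])) hpwe
      refine ⟨s :: e :: bs, ?_, ?_⟩
      · simp only [strLen_eq] at hb ⊢
        simp only [altBounds]
        rw [if_neg (by omega)]
        rw [if_neg (by simp; omega)]
        rw [hb]; rfl
      · simp only [spansToPiecesLoop, strLen_eq]
        rw [if_neg (by omega)]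
        rw [if_neg (by simp; omega)]
        rw [hloop]
        simp [piecesOf, everyOther_cons]

-- ===== VERDICT (by name: the statement is the Claim_ definition above) =====
theorem spans_to_pieces_spec : Claim_equal_spans_to_pieces := by
  intro text spans _ hpre
  unfold Spec_spans_to_pieces
  by_cases h : spans = []
  · subst h; rfl
  · obtain ⟨hlen, hpw⟩ := hpre
    obtain ⟨bs, hb, hloop⟩ := loop_eq text spans 0 [] [] le_rfl hlen hpw
    simp only [strLen_eq] at hb
    simp only [spans_to_pieces, spans_to_pieces_alt, if_neg h, hloop,
      zip_map_eq_piecesOf, strLen_eq, hb, List.nil_append]
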